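-- pv_equiv track=rewrite | github.com/btlee215/bme590hrm | hrmcalcs.py | hrmtb
-- ===== SOURCE A (Python) =====
-- def hrmtb(instant_hr, b_thresh=60, t_thresh=100):
--     """
--     This function is used to detect whether a patient has bradycardia
--      or tachycardia
--     :param instant_hr: array of instantaneous heart rate values
--     :return: This function returns arrays titled tachy and brady.
--     Both arrays are filled with 0s and 1s with a 1
--     representing the detection of tachycardia or bradycardia.
--     Note: in order for either diagnosis to be recorded, the heart rate
--     condition must be met for three consecutive heart beats.
--     :param b_thresh: The threshold value for heart rate
--     indicating bradycardia (default 60)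
--     :param t_thresh: The threshold value for heart rate
--     indicating tachycardia (default 100)
--
--     """
--
--     tachy = []
--     brady = []
--     count = 0
--     for i in instant_hr:
--         if count > 1:
--             if instant_hr[count] < b_thresh and \
--                 instant_hr[count - 1] < b_thresh \
--                     and instant_hr[count - 2] < b_thresh:
--                 brady.append(1)
--                 tachy.append(0)
--             elif instant_hr[count] > t_thresh and \
--                 instant_hr[count - 1] > t_thresh \
--                     and instant_hr[count - 2] > t_thresh:
--                 brady.append(0)
--                 tachy.append(1)
--             else:
--                 brady.append(0)
--                 tachy.append(0)
--         else:
--             brady.append(0)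
--             tachy.append(0)
--         count += 1
--
--     return tachy, brady
-- ===== SOURCE B (Python) =====
-- def hrmtb(instant_hr, b_thresh=60, t_thresh=100):
--     tachy = []
--     brady = []
--     cb = 0  # length of current run of beats strictly below b_thresh
--     ct = 0  # length of current run of beats strictly above t_thresh
--     for x in instant_hr:
--         cb = cb + 1 if x < b_thresh else 0
--         ct = ct + 1 if x > t_thresh else 0
--         if cb >= 3:
--             brady.append(1)
--             tachy.append(0)
--         elif ct >= 3:
--             brady.append(0)
--             tachy.append(1)
--         else:
--             brady.append(0)
--             tachy.append(0)
--     return tachy, brady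
-- ===== Notes on version B (the rewrite author's own statement) =====
-- stated objective: alternative
-- what changed: B maintains two running run-length counters (consecutive beats below/above the thresholds) in a single pass instead of indexing the array two elements back at each step.
import Mathlib
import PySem

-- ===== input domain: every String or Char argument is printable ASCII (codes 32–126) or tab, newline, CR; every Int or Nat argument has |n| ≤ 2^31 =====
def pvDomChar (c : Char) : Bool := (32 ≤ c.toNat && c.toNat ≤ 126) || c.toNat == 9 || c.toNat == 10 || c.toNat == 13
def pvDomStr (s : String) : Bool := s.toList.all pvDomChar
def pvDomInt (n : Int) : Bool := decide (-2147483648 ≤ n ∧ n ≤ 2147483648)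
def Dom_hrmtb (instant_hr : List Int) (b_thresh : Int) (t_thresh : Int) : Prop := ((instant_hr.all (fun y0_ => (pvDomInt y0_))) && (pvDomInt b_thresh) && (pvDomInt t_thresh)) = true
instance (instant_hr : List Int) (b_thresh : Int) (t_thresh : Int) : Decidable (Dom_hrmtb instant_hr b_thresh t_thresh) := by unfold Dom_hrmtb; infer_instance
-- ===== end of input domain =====

-- B replaces A's index-two-back window test by two running run-length counters (alternative decomposition, same cost).


-- ===== PORT A =====
-- loop body of A: state = (tachy, brady, count); indexes back into the whole list
def hrmtbStepA (instant_hr : List Int) (b_thresh : Int) (t_thresh : Int)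
    (st : List Int × List Int × Int) (_i : Int) : List Int × List Int × Int :=
  let tachy := st.1
  let brady := st.2.1
  let count := st.2.2
  if count > 1 then
    if PySem.List.pyGetD instant_hr count 0 < b_thresh ∧
       PySem.List.pyGetD instant_hr (count - 1) 0 < b_thresh ∧
       PySem.List.pyGetD instant_hr (count - 2) 0 < b_thresh then
      (tachy ++ [0], brady ++ [1], count + 1)
    else if PySem.List.pyGetD instant_hr count 0 > t_thresh ∧
            PySem.List.pyGetD instant_hr (count - 1) 0 > t_thresh ∧
            PySem.List.pyGetD instant_hr (count - 2) 0 > t_thresh then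
      (tachy ++ [1], brady ++ [0], count + 1)
    else
      (tachy ++ [0], brady ++ [0], count + 1)
  else
    (tachy ++ [0], brady ++ [0], count + 1)

def hrmtb (instant_hr : List Int) (b_thresh : Int) (t_thresh : Int) : List Int × List Int :=
  let st := instant_hr.foldl (hrmtbStepA instant_hr b_thresh t_thresh) ([], [], 0)
  (st.1, st.2.1)

-- ===== PORT B =====
-- loop body of B: state = (tachy, brady, cb, ct) with the two run-length counters
def hrmtbStepB (b_thresh : Int) (t_thresh : Int)
    (st : List Int × List Int × Int × Int) (x : Int) : List Int × List Int × Int × Int :=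
  let tachy := st.1
  let brady := st.2.1
  let cb := if x < b_thresh then st.2.2.1 + 1 else 0
  let ct := if x > t_thresh then st.2.2.2 + 1 else 0
  if cb ≥ 3 then (tachy ++ [0], brady ++ [1], cb, ct)
  else if ct ≥ 3 then (tachy ++ [1], brady ++ [0], cb, ct)
  else (tachy ++ [0], brady ++ [0], cb, ct)

def hrmtb_alt (instant_hr : List Int) (b_thresh : Int) (t_thresh : Int) : List Int × List Int :=
  let st := instant_hr.foldl (hrmtbStepB b_thresh t_thresh) ([], [], 0, 0)
  (st.1, st.2.1)

-- ===== PRECONDITION & SPEC =====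
def Spec_hrmtb (instant_hr : List Int) (b_thresh : Int) (t_thresh : Int) (out : List Int × List Int) : Prop := out = hrmtb_alt instant_hr b_thresh t_thresh
instance (instant_hr : List Int) (b_thresh : Int) (t_thresh : Int) (out : List Int × List Int) : Decidable (Spec_hrmtb instant_hr b_thresh t_thresh out) := by unfold Spec_hrmtb; infer_instance

-- ===== CLAIM (what is proved, stated in full; the proofs are below) =====
def Claim_equal_hrmtb : Prop := ∀ (instant_hr : List Int) (b_thresh : Int) (t_thresh : Int), Dom_hrmtb instant_hr b_thresh t_thresh → Spec_hrmtb instant_hr b_thresh t_thresh (hrmtb instant_hr b_thresh t_thresh)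

-- ===== LEMMAS AND PROOFS =====

-- Main loop invariant: with c elements already processed (count = c), B's counters
-- cb/ct are nonnegative and truncate exactly to whether the last one/two processed
-- elements were below b_thresh / above t_thresh; under that invariant the two folds
-- emit the same tachy and brady lists on the remaining suffix hr.drop c.
theorem hrmtb_loop (hr : List Int) (b t : Int) :
    ∀ (r : List Int) (c : Nat) (tac bra : List Int) (cb ct : Int),
      hr.drop c = r →
      0 ≤ cb → 0 ≤ ct →
      (1 ≤ cb ↔ (1 ≤ c ∧ hr.getD (c - 1) 0 < b)) →
      (2 ≤ cb ↔ (2 ≤ c ∧ hr.getD (c - 1) 0 < b ∧ hr.getD (c - 2) 0 < b)) →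
      (1 ≤ ct ↔ (1 ≤ c ∧ t < hr.getD (c - 1) 0)) →
      (2 ≤ ct ↔ (2 ≤ c ∧ t < hr.getD (c - 1) 0 ∧ t < hr.getD (c - 2) 0)) →
      (r.foldl (hrmtbStepA hr b t) (tac, bra, (c : Int))).1
        = (r.foldl (hrmtbStepB b t) (tac, bra, cb, ct)).1 ∧
      (r.foldl (hrmtbStepA hr b t) (tac, bra, (c : Int))).2.1
        = (r.foldl (hrmtbStepB b t) (tac, bra, cb, ct)).2.1 := by
  intro r
  induction r with
  | nil => intro c tac bra cb ct _ _ _ _ _ _ _; simp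
  | cons x r ih =>
    intro c tac bra cb ct hdrop hcb0 hct0 h1 h2 g1 g2
    have hc : c < hr.length := by
      by_contra h
      simp [List.drop_eq_nil_of_le (by omega : hr.length ≤ c)] at hdrop
    have h0 : (List.drop c hr)[0]? = hr[c + 0]? := List.getElem?_drop
    rw [hdrop] at h0
    simp at h0
    have hx : hr.getD c 0 = x := by simp [List.getD, ← h0]
    have hdrop' : hr.drop (c + 1) = r := by
      have hd : hr.drop (c + 1) = (hr.drop c).tail := by
        rw [← List.drop_drop]; simp
      rw [hd, hdrop]; rfl
    simp only [List.foldl_cons]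
    -- one step of each loop body produces the same appended outputs
    have hB1 : (hrmtbStepB b t (tac, bra, cb, ct) x).2.2.1
        = (if x < b then cb + 1 else 0) := by
      simp only [hrmtbStepB]; split_ifs <;> rfl
    have hB2 : (hrmtbStepB b t (tac, bra, cb, ct) x).2.2.2
        = (if t < x then ct + 1 else 0) := by
      simp only [hrmtbStepB]; split_ifs <;> rfl
    have hA : hrmtbStepA hr b t (tac, bra, (c : Int)) x
        = ((hrmtbStepB b t (tac, bra, cb, ct) x).1,
           (hrmtbStepB b t (tac, bra, cb, ct) x).2.1, ((c : Int) + 1)) := by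
      simp only [hrmtbStepA, hrmtbStepB]
      by_cases hcgt : (c : Int) > 1
      . have hc2 : 2 ≤ c := by omega
        have e0 : PySem.List.pyGetD hr ((c : Nat) : Int) 0 = hr.getD c 0 :=
          PySem.List.pyGetD_natCast hr c 0
        have e1 : PySem.List.pyGetD hr ((c : Int) - 1) 0 = hr.getD (c - 1) 0 := by
          rw [(by omega : ((c : Int) - 1) = ((c - 1 : Nat) : Int))]
          exact PySem.List.pyGetD_natCast hr (c - 1) 0
        have e2 : PySem.List.pyGetD hr ((c : Int) - 2) 0 = hr.getD (c - 2) 0 := by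
          rw [(by omega : ((c : Int) - 2) = ((c - 2 : Nat) : Int))]
          exact PySem.List.pyGetD_natCast hr (c - 2) 0
        rw [if_pos hcgt]
        simp only [e0, e1, e2, hx, ge_iff_le]
        split_ifs <;> first | rfl | (simp only [List.getD] at * ; omega)
      . rw [if_neg hcgt]
        simp only [ge_iff_le]
        split_ifs <;> first | rfl | omega
    rw [hA]
    rw [(by push_cast; ring : ((c : Int) + 1) = ((c + 1 : Nat) : Int))]
    have hst : hrmtbStepB b t (tac, bra, cb, ct) x
        = ((hrmtbStepB b t (tac, bra, cb, ct) x).1,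
           (hrmtbStepB b t (tac, bra, cb, ct) x).2.1,
           (hrmtbStepB b t (tac, bra, cb, ct) x).2.2.1,
           (hrmtbStepB b t (tac, bra, cb, ct) x).2.2.2) := rfl
    rw [hst]
    have i1 : c + 1 - 1 = c := by omega
    have i2 : c + 1 - 2 = c - 1 := by omega
    refine ih (c + 1) _ _ _ _ hdrop' ?_ ?_ ?_ ?_ ?_ ?_
    . rw [hB1]; split_ifs <;> omega
    . rw [hB2]; split_ifs <;> omega
    . rw [hB1, i1, hx]; split_ifs with hxb <;> omega
    . rw [hB1, i1, i2, hx]; split_ifs with hxb <;> omega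
    . rw [hB2, i1, hx]; split_ifs with hxt <;> omega
    . rw [hB2, i1, i2, hx]; split_ifs with hxt <;> omega

-- ===== VERDICT (by name: the statement is the Claim_ definition above) =====
theorem hrmtb_spec : Claim_equal_hrmtb := by
  intro hr b t _
  unfold Spec_hrmtb hrmtb hrmtb_alt
  have h := hrmtb_loop hr b t hr 0 [] [] 0 0 (by simp) (by omega) (by omega)
    (by simp) (by simp) (by simp) (by simp)
  exact Prod.ext h.1 h.2
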